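-- pv_equiv track=rewrite | github.com/intezer/PyJSClear | pyjsclear/utils/string_decoders.py | base64_transform
-- ===== SOURCE A (Python) =====
-- _BASE_64_ALPHABET = 'abcdefghijklmnopqrstuvwxyzABCDEFGHIJKLMNOPQRSTUVWXYZ0123456789+/='
--
-- def base64_transform(encoded_string: str) -> str:
--     """Decode obfuscator.io's custom base64 encoding to a UTF-8 string."""
--     # Decode 4 base64 chars into 3 bytes using 6-bit groups.
--     # bit_buffer accumulates bits; every non-first char in a group yields a byte
--     # via right-shift with mask derived from position within the group.
--     decoded_chars = ''
--     bit_count = 0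
--     bit_buffer = 0
--     for character in encoded_string:
--         char_index = _BASE_64_ALPHABET.find(character)
--         if char_index == -1:
--             continue
--         bit_buffer = bit_buffer * 64 + char_index if (bit_count % 4) else char_index
--         if bit_count % 4:
--             decoded_chars += chr(255 & (bit_buffer >> ((-2 * (bit_count + 1)) & 6)))
--         bit_count += 1
--     # Convert to raw bytes then decode as UTF-8 (matching JS decodeURIComponent)
--     try:
--         raw_bytes = bytes(ord(character) for character in decoded_chars)
--         return raw_bytes.decode('utf-8')
--     except (UnicodeDecodeError, ValueError):
--         return decoded_chars
-- ===== SOURCE B (Python) =====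
-- _BASE_64_ALPHABET = 'abcdefghijklmnopqrstuvwxyzABCDEFGHIJKLMNOPQRSTUVWXYZ0123456789+/='
--
--
-- def base64_transform(encoded_string: str) -> str:
--     """Decode obfuscator.io's custom base64 encoding to a UTF-8 string."""
--     # Two-phase pipeline: first collect the 6-bit indices ('=' stays index 64,
--     # unknown characters are dropped), then consume them in groups of four,
--     # packing each group into an integer and emitting its bytes directly.
--     indices = [i for i in (_BASE_64_ALPHABET.find(c) for c in encoded_string)
--                if i != -1]
--     out = bytearray()
--     pos = 0
--     while pos + 1 < len(indices):
--         n = indices[pos] * 64 + indices[pos + 1]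
--         out.append((n >> 4) & 255)
--         if pos + 2 < len(indices):
--             n = n * 64 + indices[pos + 2]
--             out.append((n >> 2) & 255)
--             if pos + 3 < len(indices):
--                 out.append((n * 64 + indices[pos + 3]) & 255)
--         pos += 4
--     try:
--         return out.decode('utf-8')
--     except UnicodeDecodeError:
--         return ''.join(chr(b) for b in out)
-- ===== Notes on version B (the rewrite author's own statement) =====
-- stated objective: alternative
-- what changed: A's single stateful loop (mod-4 bit counter and running bit buffer, emitting one char per matched input character) is replaced by a two-phase pipeline: first collect the 6-bit indices ('=' stays 64, unmatched characters dropped), then consume the index list in groups of four, packing each group and emitting its one to three bytes directly.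
import Mathlib
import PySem

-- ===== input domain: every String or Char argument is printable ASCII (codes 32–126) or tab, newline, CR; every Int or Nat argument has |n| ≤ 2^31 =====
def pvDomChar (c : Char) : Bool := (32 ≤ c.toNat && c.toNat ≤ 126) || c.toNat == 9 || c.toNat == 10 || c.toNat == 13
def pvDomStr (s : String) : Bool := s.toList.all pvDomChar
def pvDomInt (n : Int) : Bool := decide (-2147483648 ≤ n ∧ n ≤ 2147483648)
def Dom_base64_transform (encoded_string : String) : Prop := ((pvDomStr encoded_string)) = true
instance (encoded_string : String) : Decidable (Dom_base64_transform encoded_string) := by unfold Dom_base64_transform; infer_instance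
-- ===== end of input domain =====

-- B replaces A's single stateful loop (mod-4 counter + bit buffer) by a two-phase
-- pipeline — collect the 6-bit indices, then emit bytes per group of four — for clarity
-- (objective: alternative; same cost).


-- ===== PORT A =====
def pvAlphabet : String := "abcdefghijklmnopqrstuvwxyzABCDEFGHIJKLMNOPQRSTUVWXYZ0123456789+/="

-- Shared hand port of bytes(...).decode('utf-8') (strict): exact on lists of bytes
-- (< 256); returns none exactly where CPython raises UnicodeDecodeError (continuation
-- bytes 0x80–0xBF checked per position, overlong forms, surrogates ED A0.., > U+10FFFF
-- all rejected). Both Pythons call .decode('utf-8'); both ports call this helper.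
def pvUtf8Decode? : List Nat → Option (List Char)
  | [] => some []
  | b :: rest =>
    if b < 0x80 then (pvUtf8Decode? rest).map (Char.ofNat b :: ·)
    else if b < 0xC2 then none
    else if b < 0xE0 then
      match rest with
      | c1 :: r =>
        if 0x80 ≤ c1 ∧ c1 < 0xC0 then
          (pvUtf8Decode? r).map (Char.ofNat ((b - 0xC0) * 64 + (c1 - 0x80)) :: ·)
        else none
      | [] => none
    else if b < 0xF0 then
      match rest with
      | c1 :: c2 :: r =>
        if (if b = 0xE0 then 0xA0 else 0x80) ≤ c1 ∧ c1 < (if b = 0xED then 0xA0 else 0xC0) ∧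
            0x80 ≤ c2 ∧ c2 < 0xC0 then
          (pvUtf8Decode? r).map
            (Char.ofNat ((b - 0xE0) * 4096 + (c1 - 0x80) * 64 + (c2 - 0x80)) :: ·)
        else none
      | _ => none
    else if b < 0xF5 then
      match rest with
      | c1 :: c2 :: c3 :: r =>
        if (if b = 0xF0 then 0x90 else 0x80) ≤ c1 ∧ c1 < (if b = 0xF4 then 0x90 else 0xC0) ∧
            0x80 ≤ c2 ∧ c2 < 0xC0 ∧ 0x80 ≤ c3 ∧ c3 < 0xC0 then
          (pvUtf8Decode? r).map
            (Char.ofNat ((b - 0xF0) * 262144 + (c1 - 0x80) * 4096 + (c2 - 0x80) * 64 + (c3 - 0x80)) :: ·)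
        else none
      | _ => none
    else none
  termination_by l => l.length
  decreasing_by all_goals (simp_all; all_goals omega)

-- chr(255 & (bit_buffer >> ((-2 * (bit_count + 1)) & 6))); the shift amount is the
-- nonnegative Python int, hence the .toNat
def pvChrA (bit_count : Nat) (bit_buffer : Int) : Char :=
  Char.ofNat ((PySem.Int.band 255
    (bit_buffer >>> ((PySem.Int.band (-2 * ((bit_count : Int) + 1)) 6).toNat))).toNat)

-- one iteration of A's for-loop, state = (decoded_chars, bit_count, bit_buffer)
def pvStepA (st : String × Nat × Int) (character : Char) : String × Nat × Int :=
  let char_index := PySem.Str.find pvAlphabet (String.singleton character)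
  if char_index = -1 then st
  else
    let bit_buffer := if st.2.1 % 4 ≠ 0 then st.2.2 * 64 + char_index else char_index
    ((if st.2.1 % 4 ≠ 0 then st.1.push (pvChrA st.2.1 bit_buffer) else st.1),
      st.2.1 + 1, bit_buffer)

def base64_transform (encoded_string : String) : String :=
  let st := encoded_string.toList.foldl pvStepA ("", 0, 0)
  -- try: bytes(ord(c) for c in decoded_chars).decode('utf-8') except ...: decoded_chars
  match pvUtf8Decode? (st.1.toList.map Char.toNat) with
  | some cps => String.ofList cps
  | none => st.1

-- ===== PORT B =====
-- the filter of B's comprehension: the index of a recognised character, none otherwise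
def pvLook (c : Char) : Option Int :=
  let i := PySem.Str.find pvAlphabet (String.singleton c)
  if i = -1 then none else some i

-- B's while-loop over the index list, consuming up to four indices per round
def pvChunks : List Int → List Int
  | a :: b :: c :: d :: rest =>
    (PySem.Int.band ((a * 64 + b) >>> (4 : Nat)) 255) ::
      (PySem.Int.band (((a * 64 + b) * 64 + c) >>> (2 : Nat)) 255) ::
      (PySem.Int.band (((a * 64 + b) * 64 + c) * 64 + d) 255) :: pvChunks rest
  | [a, b, c] =>
    [PySem.Int.band ((a * 64 + b) >>> (4 : Nat)) 255,
      PySem.Int.band (((a * 64 + b) * 64 + c) >>> (2 : Nat)) 255]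
  | [a, b] => [PySem.Int.band ((a * 64 + b) >>> (4 : Nat)) 255]
  | _ => []

def base64_transform_alt (encoded_string : String) : String :=
  let indices := encoded_string.toList.filterMap pvLook
  let out := pvChunks indices
  match pvUtf8Decode? (out.map Int.toNat) with
  | some cps => String.ofList cps
  | none => String.ofList (out.map (fun b => Char.ofNat b.toNat))

-- ===== PRECONDITION & SPEC =====
def Spec_base64_transform (encoded_string : String) (out : String) : Prop := out = base64_transform_alt encoded_string
instance (encoded_string : String) (out : String) : Decidable (Spec_base64_transform encoded_string out) := by unfold Spec_base64_transform; infer_instance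

-- ===== CLAIM (what is proved, stated in full; the proofs are below) =====
def Claim_equal_base64_transform : Prop := ∀ (encoded_string : String), Dom_base64_transform encoded_string → Spec_base64_transform encoded_string (base64_transform encoded_string)

-- ===== LEMMAS AND PROOFS =====

theorem pv_and6_mod8 (x : Nat) : 6 &&& x = 6 &&& (x % 8) := by
  have h1 : 6 &&& x = (x &&& 7) &&& 6 := by
    rw [Nat.and_comm 6 x]
    conv_lhs => rw [show (6:Nat) = 7 &&& 6 from rfl, ← Nat.and_assoc]
  have h2 : 6 &&& (x % 8) = ((x % 8) &&& 7) &&& 6 := by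
    rw [Nat.and_comm 6 (x % 8)]
    conv_lhs => rw [show (6:Nat) = 7 &&& 6 from rfl, ← Nat.and_assoc]
  rw [h1, h2, Nat.and_two_pow_sub_one_eq_mod x 3, Nat.and_two_pow_sub_one_eq_mod (x % 8) 3]
  have : x % 8 % 2 ^ 3 = x % 2 ^ 3 := by omega
  rw [this]

theorem pv_band_negSucc_six (m : Nat) :
    PySem.Int.band (Int.negSucc m) 6 = ((6 - (6 &&& m) : Nat) : Int) := by
  rw [Int.negSucc_eq]
  unfold PySem.Int.band
  rw [if_neg (by omega), if_pos (by omega)]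
  norm_num
  rfl

theorem pv_shift_eq (cnt : Nat) (r : Nat) (h : cnt % 4 = r) (hr : r = 1 ∨ r = 2 ∨ r = 3) :
    (PySem.Int.band (-2 * ((cnt : Int) + 1)) 6).toNat = 6 - 2 * r := by
  obtain ⟨k, rfl⟩ : ∃ k, cnt = 4 * k + r := ⟨cnt / 4, by omega⟩
  have hneg : (-2 * (((4 * k + r : Nat) : Int) + 1)) = Int.negSucc (8 * k + (2 * r + 1)) := by
    rw [Int.negSucc_eq]; push_cast; ring
  rw [hneg, pv_band_negSucc_six, Int.toNat_natCast, pv_and6_mod8]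
  have hm : (8 * k + (2 * r + 1)) % 8 = 2 * r + 1 := by omega
  rw [hm]
  rcases hr with rfl | rfl | rfl <;> decide

theorem pv_band255_range (x : Int) :
    0 ≤ PySem.Int.band x 255 ∧ PySem.Int.band x 255 < 256 := by
  unfold PySem.Int.band
  have e : (255 : Int).toNat = 255 := rfl
  split_ifs with h1 h2 h2
  · rw [e]
    have := Nat.and_le_right (n := x.toNat) (m := 255)
    omega
  · omega
  · rw [e]
    omega
  · omega

theorem pv_chrA_eq (cnt : Nat) (buf : Int) (r : Nat) (h : cnt % 4 = r)
    (hr : r = 1 ∨ r = 2 ∨ r = 3) :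
    pvChrA cnt buf = Char.ofNat ((PySem.Int.band (buf >>> (6 - 2 * r)) 255).toNat) := by
  unfold pvChrA
  rw [pv_shift_eq cnt r h hr, PySem.Int.band_comm]

-- an index-consuming version of A's loop body (A's body after the 'continue' filter)
def pvStepI (st : String × Nat × Int) (char_index : Int) : String × Nat × Int :=
  let bit_buffer := if st.2.1 % 4 ≠ 0 then st.2.2 * 64 + char_index else char_index
  ((if st.2.1 % 4 ≠ 0 then st.1.push (pvChrA st.2.1 bit_buffer) else st.1),
    st.2.1 + 1, bit_buffer)

-- A folded over the characters equals the index-consuming step folded over the indices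
theorem pv_foldA_eq_foldI (cs : List Char) :
    ∀ st, cs.foldl pvStepA st = (cs.filterMap pvLook).foldl pvStepI st := by
  induction cs with
  | nil => intro st; rfl
  | cons c cs ih =>
    intro st
    by_cases h : PySem.Str.find pvAlphabet (String.singleton c) = -1
    · have hl : pvLook c = none := by
        simp only [pvLook]
        rw [if_pos h]
      rw [List.foldl_cons, List.filterMap_cons_none hl]
      rw [show pvStepA st c = st from by unfold pvStepA; rw [if_pos h]]
      exact ih st
    · have hl : pvLook c = some (PySem.Str.find pvAlphabet (String.singleton c)) := by
        simp only [pvLook]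
        rw [if_neg h]
      rw [List.foldl_cons, List.filterMap_cons_some hl, List.foldl_cons]
      rw [show pvStepA st c = pvStepI st (PySem.Str.find pvAlphabet (String.singleton c)) from by
        unfold pvStepA pvStepI; rw [if_neg h]]
      exact ih _
-- the main loop invariant: from a group boundary, A's loop appends exactly the bytes
-- (as characters) that B's chunk loop produces
theorem pv_inv (idxs : List Int) :
    ∀ (dec : String) (cnt : Nat) (buf : Int), cnt % 4 = 0 →
      (idxs.foldl pvStepI (dec, cnt, buf)).1.toList =
        dec.toList ++ (pvChunks idxs).map (fun b => Char.ofNat b.toNat) := by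
  induction idxs using pvChunks.induct with
  | case1 a b c d rest ih =>
    intro dec cnt buf h
    have h1 : (cnt + 1) % 4 = 1 := by omega
    have h2 : (cnt + 2) % 4 = 2 := by omega
    have h3 : (cnt + 3) % 4 = 3 := by omega
    simp only [List.foldl_cons]
    rw [show pvStepI (dec, cnt, buf) a = (dec, cnt + 1, a) from by
          unfold pvStepI; simp [h]]
    rw [show pvStepI (dec, cnt + 1, a) b =
          (dec.push (pvChrA (cnt + 1) (a * 64 + b)), cnt + 2, a * 64 + b) from by
          unfold pvStepI; simp [h1]]
    rw [show pvStepI (dec.push (pvChrA (cnt + 1) (a * 64 + b)), cnt + 2, a * 64 + b) c =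
          ((dec.push (pvChrA (cnt + 1) (a * 64 + b))).push
              (pvChrA (cnt + 2) ((a * 64 + b) * 64 + c)),
            cnt + 3, (a * 64 + b) * 64 + c) from by
          unfold pvStepI; simp [h2]]
    rw [show pvStepI ((dec.push (pvChrA (cnt + 1) (a * 64 + b))).push
              (pvChrA (cnt + 2) ((a * 64 + b) * 64 + c)),
            cnt + 3, (a * 64 + b) * 64 + c) d =
          (((dec.push (pvChrA (cnt + 1) (a * 64 + b))).push
              (pvChrA (cnt + 2) ((a * 64 + b) * 64 + c))).push
              (pvChrA (cnt + 3) (((a * 64 + b) * 64 + c) * 64 + d)),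
            cnt + 4, ((a * 64 + b) * 64 + c) * 64 + d) from by
          unfold pvStepI; simp [h3]]
    rw [ih _ (cnt + 4) _ (by omega)]
    rw [pv_chrA_eq (cnt + 1) _ 1 h1 (by omega), pv_chrA_eq (cnt + 2) _ 2 h2 (by omega),
      pv_chrA_eq (cnt + 3) _ 3 h3 (by omega)]
    simp only [pvChunks]
    simp [String.toList_push]
  | case2 a b c =>
    intro dec cnt buf h
    have h1 : (cnt + 1) % 4 = 1 := by omega
    have h2 : (cnt + 2) % 4 = 2 := by omega
    simp only [List.foldl_cons, List.foldl_nil]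
    rw [show pvStepI (dec, cnt, buf) a = (dec, cnt + 1, a) from by unfold pvStepI; simp [h]]
    rw [show pvStepI (dec, cnt + 1, a) b =
          (dec.push (pvChrA (cnt + 1) (a * 64 + b)), cnt + 2, a * 64 + b) from by
          unfold pvStepI; simp [h1]]
    rw [show pvStepI (dec.push (pvChrA (cnt + 1) (a * 64 + b)), cnt + 2, a * 64 + b) c =
          ((dec.push (pvChrA (cnt + 1) (a * 64 + b))).push
              (pvChrA (cnt + 2) ((a * 64 + b) * 64 + c)),
            cnt + 3, (a * 64 + b) * 64 + c) from by
          unfold pvStepI; simp [h2]]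
    rw [pv_chrA_eq (cnt + 1) _ 1 h1 (by omega), pv_chrA_eq (cnt + 2) _ 2 h2 (by omega)]
    simp only [pvChunks]
    simp [String.toList_push]
  | case3 a b =>
    intro dec cnt buf h
    have h1 : (cnt + 1) % 4 = 1 := by omega
    simp only [List.foldl_cons, List.foldl_nil]
    rw [show pvStepI (dec, cnt, buf) a = (dec, cnt + 1, a) from by unfold pvStepI; simp [h]]
    rw [show pvStepI (dec, cnt + 1, a) b =
          (dec.push (pvChrA (cnt + 1) (a * 64 + b)), cnt + 2, a * 64 + b) from by
          unfold pvStepI; simp [h1]]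
    rw [pv_chrA_eq (cnt + 1) _ 1 h1 (by omega)]
    simp only [pvChunks]
    simp [String.toList_push]
  | case4 l h4 h3' h2' =>
    intro dec cnt buf h
    match l, h4, h3', h2' with
    | [], _, _, _ => simp [pvChunks]
    | [a], _, _, _ =>
      simp only [List.foldl_cons, List.foldl_nil]
      rw [show pvStepI (dec, cnt, buf) a = (dec, cnt + 1, a) from by unfold pvStepI; simp [h]]
      simp [pvChunks]
    | [a, b], _, _, hbad => exact absurd rfl (hbad a b)
    | [a, b, c], _, hbad, _ => exact absurd rfl (hbad a b c)
    | a :: b :: c :: d :: rest, hbad, _, _ => exact absurd rfl (hbad a b c d rest)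

-- every chunk byte is in [0, 256)
theorem pv_chunks_range (idxs : List Int) :
    ∀ b ∈ pvChunks idxs, 0 ≤ b ∧ b < 256 := by
  induction idxs using pvChunks.induct with
  | case1 a b c d rest ih =>
    intro x hx
    simp only [pvChunks] at hx
    simp only [List.mem_cons] at hx
    rcases hx with rfl | rfl | rfl | hx
    · exact pv_band255_range _
    · exact pv_band255_range _
    · exact pv_band255_range _
    · exact ih x hx
  | case2 a b c =>
    intro x hx
    simp only [pvChunks] at hx
    simp only [List.mem_cons, List.not_mem_nil, or_false] at hx
    rcases hx with rfl | rfl <;> exact pv_band255_range _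
  | case3 a b =>
    intro x hx
    simp only [pvChunks] at hx
    simp only [List.mem_cons, List.not_mem_nil, or_false] at hx
    rcases hx with rfl; exact pv_band255_range _
  | case4 l h4 h3' h2' =>
    match l, h4, h3', h2' with
    | [], _, _, _ => simp [pvChunks]
    | [a], _, _, _ => simp [pvChunks]
    | [a, b], _, _, hbad => exact absurd rfl (hbad a b)
    | [a, b, c], _, hbad, _ => exact absurd rfl (hbad a b c)
    | a :: b :: c :: d :: rest, hbad, _, _ => exact absurd rfl (hbad a b c d rest)

theorem pv_toNat_roundtrip (idxs : List Int) :
    ((pvChunks idxs).map (fun b => Char.ofNat b.toNat)).map Char.toNat =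
      (pvChunks idxs).map Int.toNat := by
  rw [List.map_map]
  apply List.map_congr_left
  intro b hb
  have hr := pv_chunks_range idxs b hb
  simp only [Function.comp_apply]
  have hv : b.toNat < 55296 := by omega
  simp [Char.ofNat, Nat.isValidChar, hv]

-- ===== VERDICT (by name: the statement is the Claim_ definition above) =====
theorem base64_transform_spec : Claim_equal_base64_transform := by
  intro s _
  unfold Spec_base64_transform
  simp only [base64_transform, base64_transform_alt]
  rw [pv_foldA_eq_foldI]
  have hlist := pv_inv (s.toList.filterMap pvLook) "" 0 0 rfl
  simp only [String.toList_empty, List.nil_append] at hlist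
  rw [hlist, pv_toNat_roundtrip]
  cases hdec : pvUtf8Decode? ((pvChunks (s.toList.filterMap pvLook)).map Int.toNat) with
  | some cps => rfl
  | none =>
    show ((s.toList.filterMap pvLook).foldl pvStepI ("", 0, 0)).1 = _
    rw [← String.ofList_toList
      (s := ((s.toList.filterMap pvLook).foldl pvStepI ("", 0, 0)).1), hlist]
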